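-- pv_equiv track=rewrite | github.com/Yawn-Sean/Daily_CF_Problems | daily_problems/2025/08/0818/personal_submission/cf67a_liryc.py | solve
-- ===== SOURCE A (Python) =====
-- def solve(n: int, s: str) -> list[int]:
--     a = [1] * n
--     p = 0
--     for i, c in enumerate(s):
--         if c == 'R':
--             if not p:
--                 p = 1
--             p += 1
--             a[i + 1] = p
--         elif c == '=':
--             if p:
--                 a[i + 1] = p
--         else:
--             p = 0
--     p = 0
--     for j in range(n - 2, -1, -1):
--         c = s[j]
--         if c == 'L':
--             if not p:
--                 p = 1
--             p += 1
--             if p > a[j]: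
--                 a[j] = p
--             else:
--                 p = 0
--         elif c == '=':
--             if p:
--                 a[j] = p
--         else:
--             p = 0
--     return a
-- ===== SOURCE B (Python) =====
-- def solve(n: int, s: str) -> list[int]:
--     s = s[:n - 1] if n >= 1 else ''
--     f = [1]
--     for c in s:
--         f.append(f[-1] + 1 if c == 'R' else f[-1] if c == '=' else 1)
--     g = [1]
--     for c in reversed(s):
--         g.append(g[-1] + 1 if c == 'L' else g[-1] if c == '=' else 1)
--     g.reverse()
--     return [max(f[i], g[i]) for i in range(max(n, 0))]
-- ===== Notes on version B (the rewrite author's own statement) =====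
-- stated objective: alternative
-- what changed: Replaces A's two coupled in-place scans (one mutated array plus reset bookkeeping in a counter p) by two independent pure directional tables f (left-to-right) and g (right-to-left) over the n-1 relevant characters, combined elementwise with max.
-- outside the precondition, e.g. on solve(2, 'L='): A returns [2, 1], B returns [2, 1]
import Mathlib
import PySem

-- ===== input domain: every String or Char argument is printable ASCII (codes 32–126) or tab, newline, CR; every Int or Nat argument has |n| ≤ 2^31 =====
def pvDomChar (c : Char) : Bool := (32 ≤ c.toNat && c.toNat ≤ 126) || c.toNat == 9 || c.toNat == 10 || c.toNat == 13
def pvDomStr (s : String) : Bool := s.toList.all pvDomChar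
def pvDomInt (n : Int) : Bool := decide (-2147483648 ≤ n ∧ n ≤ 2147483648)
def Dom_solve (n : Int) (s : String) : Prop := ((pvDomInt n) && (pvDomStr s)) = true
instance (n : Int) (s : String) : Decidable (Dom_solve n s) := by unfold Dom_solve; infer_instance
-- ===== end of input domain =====

-- B replaces A's two coupled in-place scans over one mutated array by two independent
-- directional tables f and g combined elementwise with max (alternative decomposition,
-- same asymptotic cost). Return-value equivalence only (A mutates only locals).

-- ===== PORT A =====
def solveStep1 (st : List Int × Int) (ic : Int × Char) : List Int × Int :=
  let a := st.1; let p := st.2; let i := ic.1; let c := ic.2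
  if c = 'R' then
    let p := if p = 0 then 1 else p
    let p := p + 1
    (a.set (i + 1).toNat p, p)
  else if c = '=' then
    if p ≠ 0 then (a.set (i + 1).toNat p, p) else (a, p)
  else (a, 0)

def solveStep2 (s : String) (st : List Int × Int) (j : Int) : List Int × Int :=
  let a := st.1; let p := st.2
  match PySem.Str.pyGet? s j with
  | none => (a, p)   -- s[j] out of range: Python would raise; unreachable under Pre_solve
  | some c =>
    if c = 'L' then
      let p := if p = 0 then 1 else p
      let p := p + 1
      if p > PySem.List.pyGetD a j 0 then (a.set j.toNat p, p) else (a, 0)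
    else if c = '=' then
      if p ≠ 0 then (a.set j.toNat p, p) else (a, p)
    else (a, 0)

def solve (n : Int) (s : String) : List Int :=
  let a := List.replicate n.toNat 1
  let st1 := (PySem.List.enumerate s.toList 0).foldl solveStep1 (a, 0)
  let st2 := (PySem.List.pyRange (n - 2) (-1) (-1)).foldl (solveStep2 s) (st1.1, 0)
  st2.1

-- ===== PORT B =====
def bStepF (f : List Int) (c : Char) : List Int :=
  f ++ [if c = 'R' then PySem.List.pyGetD f (-1) 0 + 1
        else if c = '=' then PySem.List.pyGetD f (-1) 0 else 1]

def bStepG (g : List Int) (c : Char) : List Int :=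
  g ++ [if c = 'L' then PySem.List.pyGetD g (-1) 0 + 1
        else if c = '=' then PySem.List.pyGetD g (-1) 0 else 1]

def solve_alt (n : Int) (s : String) : List Int :=
  let s2 := if 1 ≤ n then PySem.Str.slice s none (some (n - 1)) else ""
  let f := s2.toList.foldl bStepF [1]
  let g := (s2.toList.reverse.foldl bStepG [1]).reverse
  (PySem.List.pyRange 0 (max n 0) 1).map
    (fun i => max (PySem.List.pyGetD f i 0) (PySem.List.pyGetD g i 0))

-- ===== PRECONDITION & SPEC =====
-- Pre_solve is A's return domain up to one conservative carve-out: for n ≥ 2 it requires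
-- |s| ≥ n - 1 and no 'R' or '=' at positions ≥ n - 1 (an 'R' there always raises
-- IndexError; an '=' there raises exactly when a comparison chain is still active, a
-- history-dependent condition with no closed form, so all such '=' are excluded
-- conservatively); for n ≤ 1 it requires s to contain no 'R' (one raises IndexError).
def Pre_solve (n : Int) (s : String) : Prop :=
  (n ≤ 1 ∧ 'R' ∉ s.toList) ∨
  (2 ≤ n ∧ (n - 1 : Int) ≤ (s.toList.length : Int) ∧
    (s.toList.drop (n - 1).toNat).all (fun c => !(c == 'R' || c == '=')) = true)
instance (n : Int) (s : String) : Decidable (Pre_solve n s) := by unfold Pre_solve; infer_instance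
def pvWitness_solve : Int × String := (3, "R=")

def Spec_solve (n : Int) (s : String) (out : List Int) : Prop := out = solve_alt n s
instance (n : Int) (s : String) (out : List Int) : Decidable (Spec_solve n s out) := by unfold Spec_solve; infer_instance

-- ===== CLAIM (what is proved, stated in full; the proofs are below) =====
def Claim_equal_solve : Prop := ∀ (n : Int) (s : String), Dom_solve n s → Pre_solve n s → Spec_solve n s (solve n s)

-- ===== LEMMAS AND PROOFS =====

-- Pure directional tables (proof-side characterisation of B's folds).
def stepF (v : Int) (c : Char) : Int := if c = 'R' then v + 1 else if c = '=' then v else 1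
def stepG (v : Int) (c : Char) : Int := if c = 'L' then v + 1 else if c = '=' then v else 1

def fwdB (v : Int) : List Char → List Int
  | [] => [v]
  | c :: cs => v :: fwdB (stepF v c) cs

def bwdB : List Char → List Int
  | [] => [1]
  | c :: cs => stepG (bwdB cs).headI c :: bwdB cs

theorem fwdB_length (v : Int) (cs : List Char) : (fwdB v cs).length = cs.length + 1 := by
  induction cs generalizing v with
  | nil => simp [fwdB]
  | cons c cs ih => simp [fwdB, ih]

theorem bwdB_length (cs : List Char) : (bwdB cs).length = cs.length + 1 := by
  induction cs with
  | nil => simp [bwdB]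
  | cons c cs ih => simp [bwdB, ih]

theorem fwdB_pos (v : Int) (cs : List Char) (hv : 1 ≤ v) :
    ∀ x ∈ fwdB v cs, 1 ≤ x := by
  induction cs generalizing v with
  | nil => simpa [fwdB] using hv
  | cons c cs ih =>
    intro x hx
    rcases List.mem_cons.mp hx with h | h
    · omega
    · exact ih (stepF v c) (by unfold stepF; split_ifs <;> omega) x h

theorem bwdB_pos (cs : List Char) : ∀ x ∈ bwdB cs, 1 ≤ x := by
  induction cs with
  | nil => simp [bwdB]
  | cons c cs ih =>
    intro x hx
    rcases List.mem_cons.mp hx with h | h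
    · have hh : 1 ≤ (bwdB cs).headI := by
        have : (bwdB cs).headI ∈ bwdB cs := by
          cases hcs : bwdB cs with
          | nil => exact absurd hcs (by have := bwdB_length cs; intro h; rw [h] at this; simp at this)
          | cons y ys => simp
        exact ih _ this
      subst h; unfold stepG; split_ifs <;> omega
    · exact ih x h

theorem fwdB_getD_zero (v : Int) (cs : List Char) (d : Int) : (fwdB v cs).getD 0 d = v := by
  cases cs <;> simp [fwdB]

theorem fwdB_getD_succ (v : Int) (cs : List Char) (d : Int) (j : Nat) (h : j < cs.length) :
    (fwdB v cs).getD (j + 1) d = stepF ((fwdB v cs).getD j d) (cs[j]'h) := by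
  induction cs generalizing v j with
  | nil => simp at h
  | cons c cs ih =>
    cases j with
    | zero =>
      simp only [fwdB, List.getD_cons_succ, List.getD_cons_zero]
      rw [show ((fwdB (stepF v c) cs).getD 0 d) = stepF v c from fwdB_getD_zero _ _ _]
      simp
    | succ j => simpa [fwdB] using ih (stepF v c) j (by simpa using h)

theorem bwdB_headI_eq_getD (cs : List Char) (d : Int) : (bwdB cs).headI = (bwdB cs).getD 0 d := by
  cases hcs : bwdB cs with
  | nil => exact absurd hcs (by have := bwdB_length cs; intro h; rw [h] at this; simp at this)
  | cons y ys => simp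

theorem bwdB_getD (cs : List Char) (d : Int) (j : Nat) (h : j < cs.length) :
    (bwdB cs).getD j d = stepG ((bwdB cs).getD (j + 1) d) (cs[j]'h) := by
  induction cs generalizing j with
  | nil => simp at h
  | cons c cs ih =>
    cases j with
    | zero => simp [bwdB, bwdB_headI_eq_getD cs d]
    | succ j => simpa [bwdB] using ih j (by simpa using h)

theorem bwdB_getD_last (cs : List Char) (d : Int) : (bwdB cs).getD cs.length d = 1 := by
  induction cs with
  | nil => simp [bwdB]
  | cons c cs ih => simpa [bwdB] using ih

theorem fwdB_getD_pos (v : Int) (cs : List Char) (hv : 1 ≤ v) (j : Nat) (h : j < cs.length + 1) :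
    1 ≤ (fwdB v cs).getD j 0 := by
  have hlen : j < (fwdB v cs).length := by rw [fwdB_length]; omega
  rw [List.getD_eq_getElem _ _ hlen]
  exact fwdB_pos v cs hv _ (List.getElem_mem hlen)

theorem bwdB_getD_pos (cs : List Char) (j : Nat) (h : j < cs.length + 1) :
    1 ≤ (bwdB cs).getD j 0 := by
  have hlen : j < (bwdB cs).length := by rw [bwdB_length]; omega
  rw [List.getD_eq_getElem _ _ hlen]
  exact bwdB_pos cs _ (List.getElem_mem hlen)

-- B's folds compute the tables.
theorem foldF_eq (cs : List Char) : ∀ (pre : List Int) (v : Int),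
    List.foldl bStepF (pre ++ [v]) cs = pre ++ fwdB v cs := by
  induction cs with
  | nil => intro pre v; simp [fwdB]
  | cons c cs ih =>
    intro pre v
    have hstep : bStepF (pre ++ [v]) c = (pre ++ [v]) ++ [stepF v c] := by
      simp [bStepF, stepF, PySem.List.pyGetD_neg_one_append_singleton]
    simp only [List.foldl_cons, hstep]
    rw [ih (pre ++ [v]) (stepF v c)]
    simp [fwdB]

theorem foldG_eq (cs : List Char) :
    (List.foldl bStepG [1] cs.reverse).reverse = bwdB cs := by
  induction cs with
  | nil => simp [bwdB]
  | cons c cs ih =>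
    have hrev : (c :: cs).reverse = cs.reverse ++ [c] := by simp
    rw [hrev, List.foldl_append]
    have hG : List.foldl bStepG [1] cs.reverse = (bwdB cs).reverse := by
      rw [← ih, List.reverse_reverse]
    rw [hG]
    cases hcs : bwdB cs with
    | nil => exact absurd hcs (by have := bwdB_length cs; intro h; rw [h] at this; simp at this)
    | cons y ys =>
      have : (y :: ys).reverse = ys.reverse ++ [y] := by simp
      simp only [List.foldl_cons, List.foldl_nil, this]
      have hstep : bStepG (ys.reverse ++ [y]) c = (ys.reverse ++ [y]) ++ [stepG y c] := by
        simp [bStepG, stepG, PySem.List.pyGetD_neg_one_append_singleton]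
      rw [hstep]
      simp [bwdB, hcs]

theorem solve_alt_eq (n : Int) (s : String) :
    solve_alt n s = (PySem.List.pyRange 0 (max n 0) 1).map
      (fun i => max
        (PySem.List.pyGetD (fwdB 1 (if 1 ≤ n then s.toList.take (n - 1).toNat else [])) i 0)
        (PySem.List.pyGetD (bwdB (if 1 ≤ n then s.toList.take (n - 1).toNat else [])) i 0)) := by
  show (PySem.List.pyRange 0 (max n 0) 1).map
      (fun i => max
        (PySem.List.pyGetD
          ((if 1 ≤ n then PySem.Str.slice s none (some (n - 1)) else "").toList.foldl bStepF [1]) i 0)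
        (PySem.List.pyGetD
          (((if 1 ≤ n then PySem.Str.slice s none (some (n - 1)) else "").toList.reverse.foldl
            bStepG [1]).reverse) i 0)) = _
  by_cases h1 : 1 ≤ n
  · simp only [if_pos h1]
    rw [show (PySem.Str.slice s none (some (n - 1))).toList = s.toList.take (n - 1).toNat from by
      rw [PySem.Str.toList_slice]; exact PySem.List.slice_to _ (by omega)]
    rw [show ([1] : List Int) = [] ++ [1] from by simp, foldF_eq]
    rw [show ([] ++ [(1:Int)]) = [1] from by simp, foldG_eq]
    simp
  · simp only [if_neg h1]
    rfl

-- A's first loop is a no-op when s contains no 'R' and p starts at 0.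
theorem noR (cs : List Char) (h : 'R' ∉ cs) : ∀ (k : Int) (a : List Int),
    List.foldl solveStep1 (a, 0) (PySem.List.enumerate cs k) = (a, 0) := by
  induction cs with
  | nil => intro k a; rw [PySem.List.enumerate_nil]; rfl
  | cons c cs ih =>
    intro k a
    rw [PySem.List.enumerate_cons, List.foldl_cons]
    have hcR : ¬(c = 'R') := by intro hc; exact h (by simp [hc])
    have hstep : solveStep1 (a, 0) (k, c) = (a, 0) := by
      simp only [solveStep1, if_neg hcR]
      split_ifs <;> simp_all
    rw [hstep]
    exact ih (fun hm => h (List.mem_cons_of_mem _ hm)) (k + 1) a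

-- A's first loop never writes while scanning a tail free of 'R' and '='.
theorem tailNoop (cs : List Char) (h : ∀ c ∈ cs, c ≠ 'R' ∧ c ≠ '=') :
    ∀ (k : Int) (st : List Int × Int),
    ∃ q, List.foldl solveStep1 st (PySem.List.enumerate cs k) = (st.1, q) := by
  induction cs with
  | nil => intro k st; exact ⟨st.2, by rw [PySem.List.enumerate_nil]; rfl⟩
  | cons c cs ih =>
    intro k st
    rw [PySem.List.enumerate_cons, List.foldl_cons]
    have hc := h c (by simp)
    have hstep : solveStep1 st (k, c) = (st.1, 0) := by
      simp only [solveStep1, if_neg hc.1, if_neg hc.2]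
    rw [hstep]
    exact ih (fun c' hm => h c' (List.mem_cons_of_mem _ hm)) (k + 1) (st.1, 0)

-- A comprehension over range(k) of elementwise maxima is zipWith max.
theorem mapRange_eq_zipWith (f g : List Int) (k : Nat) (hf : f.length = k) (hg : g.length = k) :
    (PySem.List.pyRange 0 (k : Int) 1).map
      (fun i => max (PySem.List.pyGetD f i 0) (PySem.List.pyGetD g i 0))
    = List.zipWith max f g := by
  apply List.ext_getElem
  · simp [PySem.List.length_pyRange_one, hf, hg]
  · intro i h1 h2
    have hik : i < k := by
      simpa [PySem.List.length_pyRange_one] using h1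
    simp only [List.getElem_map, PySem.List.getElem_pyRange_one, zero_add,
      PySem.List.pyGetD_natCast, List.getElem_zipWith]
    rw [List.getD_eq_getElem _ _ (by omega), List.getD_eq_getElem _ _ (by omega)]

-- Phase 1: A's first loop computes the forward table.
def pZ (v : Int) : Int := if v = 1 then 0 else v

theorem phase1 (cs : List Char) : ∀ (pre : List Int) (v : Int), 1 ≤ v →
    ∃ q, List.foldl solveStep1 (pre ++ v :: List.replicate cs.length 1, pZ v)
        (PySem.List.enumerate cs (pre.length : Int))
      = (pre ++ fwdB v cs, q) := by
  induction cs with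
  | nil =>
    intro pre v _
    exact ⟨pZ v, by simp [PySem.List.enumerate_nil, fwdB]⟩
  | cons c cs ih =>
    intro pre v hv
    rw [PySem.List.enumerate_cons, List.length_cons, List.replicate_succ, List.foldl_cons]
    have hcast : ((pre ++ [v]).length : Int) = (pre.length : Int) + 1 := by simp
    by_cases hR : c = 'R'
    · have hstep : solveStep1 (pre ++ v :: 1 :: List.replicate cs.length 1, pZ v)
          ((pre.length : Int), c)
          = ((pre ++ [v]) ++ (v + 1) :: List.replicate cs.length 1, v + 1) := by
        have hp2 : (if pZ v = 0 then 1 else pZ v) + 1 = v + 1 := by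
          unfold pZ; split_ifs <;> omega
        have htn : (((pre.length : Int)) + 1).toNat = pre.length + 1 := by omega
        have hset : (pre ++ v :: 1 :: List.replicate cs.length 1).set (pre.length + 1) (v + 1)
            = (pre ++ [v]) ++ (v + 1) :: List.replicate cs.length 1 := by
          rw [List.set_append_right _ _ (by omega)]
          simp
        simp only [solveStep1, hR, hp2, htn, hset]
        simp
      rw [hstep]
      obtain ⟨q, hq⟩ := ih (pre ++ [v]) (v + 1) (by omega)
      have hpz : pZ (v + 1) = v + 1 := by unfold pZ; split_ifs <;> omega
      rw [hpz, hcast] at hq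
      exact ⟨q, by rw [hq]; simp [fwdB, stepF, hR]⟩
    · by_cases hE : c = '='
      · by_cases hv1 : v = 1
        · have hstep : solveStep1 (pre ++ v :: 1 :: List.replicate cs.length 1, pZ v)
              ((pre.length : Int), c)
              = ((pre ++ [v]) ++ 1 :: List.replicate cs.length 1, pZ 1) := by
            simp [solveStep1, hE, hv1, pZ]
          rw [hstep]
          obtain ⟨q, hq⟩ := ih (pre ++ [v]) 1 (by omega)
          rw [hcast] at hq
          rw [hv1] at hq ⊢
          exact ⟨q, by rw [hq]; simp [fwdB, stepF, hE]⟩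
        · have hz : pZ v = v := by unfold pZ; simp [hv1]
          have hstep : solveStep1 (pre ++ v :: 1 :: List.replicate cs.length 1, pZ v)
              ((pre.length : Int), c)
              = ((pre ++ [v]) ++ v :: List.replicate cs.length 1, v) := by
            have htn : (((pre.length : Int)) + 1).toNat = pre.length + 1 := by omega
            have hset : (pre ++ v :: 1 :: List.replicate cs.length 1).set (pre.length + 1) v
                = (pre ++ [v]) ++ v :: List.replicate cs.length 1 := by
              rw [List.set_append_right _ _ (by omega)]
              simp
            simp [solveStep1, hE, hz, show v ≠ 0 by omega, htn, hset]
          rw [hstep]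
          obtain ⟨q, hq⟩ := ih (pre ++ [v]) v hv
          rw [hcast, hz] at hq
          exact ⟨q, by rw [hq]; simp [fwdB, stepF, hE]⟩
      · have hstep : solveStep1 (pre ++ v :: 1 :: List.replicate cs.length 1, pZ v)
            ((pre.length : Int), c)
            = ((pre ++ [v]) ++ 1 :: List.replicate cs.length 1, pZ 1) := by
          simp [solveStep1, hR, hE, pZ]
        rw [hstep]
        obtain ⟨q, hq⟩ := ih (pre ++ [v]) 1 (by omega)
        rw [hcast] at hq
        exact ⟨q, by rw [hq]; simp [fwdB, stepF, hR, hE]⟩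

-- Phase 2: A's second loop raises positions to the max with the backward table.
theorem phase2 (s : String) (l : List Char)
    (hget : ∀ (j : Nat) (h : j < l.length), PySem.Str.pyGet? s (j : Int) = some (l[j]'h))
    (j : Nat) (hj : j ≤ l.length) :
    (List.foldl (solveStep2 s)
      ((fwdB 1 l).take j ++ (List.zipWith max (fwdB 1 l) (bwdB l)).drop j,
       if (fwdB 1 l).getD j 0 < (bwdB l).getD j 0 then (bwdB l).getD j 0 else 0)
      (PySem.List.pyRange ((j : Int) - 1) (-1) (-1))).1
    = List.zipWith max (fwdB 1 l) (bwdB l) := by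
  induction j with
  | zero =>
    rw [PySem.List.pyRange_neg_one_eq_nil (by omega)]
    simp
  | succ j ih =>
    have hjm : j < l.length := by omega
    have hfl : (fwdB 1 l).length = l.length + 1 := fwdB_length _ _
    have hgl : (bwdB l).length = l.length + 1 := bwdB_length _
    have hZl : (List.zipWith max (fwdB 1 l) (bwdB l)).length
        = l.length + 1 := by rw [List.length_zipWith, hfl, hgl]; omega
    have hFj : 1 ≤ (fwdB 1 l).getD j 0 :=
      fwdB_getD_pos 1 l (by norm_num) j (by omega)
    have hGj1 : 1 ≤ (bwdB l).getD (j + 1) 0 := bwdB_getD_pos _ (j + 1) (by omega)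
    have hGj : 1 ≤ (bwdB l).getD j 0 := bwdB_getD_pos _ j (by omega)
    have hsome : PySem.Str.pyGet? s (j : Int) = some (l[j]'hjm) := hget j hjm
    have hrange : PySem.List.pyRange (((j + 1 : Nat) : Int) - 1) (-1) (-1)
        = (j : Int) :: PySem.List.pyRange ((j : Int) - 1) (-1) (-1) := by
      have h1 : (((j + 1 : Nat) : Int) - 1) = (j : Int) := by push_cast; ring
      rw [h1, PySem.List.pyRange_neg_one_cons (by omega)]
    have htake : (fwdB 1 l).take (j + 1)
        = (fwdB 1 l).take j ++ [(fwdB 1 l).getD j 0] := by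
      rw [List.take_succ_eq_append_getElem (by omega), List.getD_eq_getElem _ _ (by omega)]
    have hdropZ : (List.zipWith max (fwdB 1 l) (bwdB l)).drop j
        = max ((fwdB 1 l).getD j 0) ((bwdB l).getD j 0)
          :: (List.zipWith max (fwdB 1 l) (bwdB l)).drop (j + 1) := by
      rw [List.drop_eq_getElem_cons (by omega), List.getElem_zipWith]
      rw [List.getD_eq_getElem _ _ (by omega), List.getD_eq_getElem _ _ (by omega)]
    have hAj1 : (fwdB 1 l).take (j + 1)
          ++ (List.zipWith max (fwdB 1 l) (bwdB l)).drop (j + 1)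
        = (fwdB 1 l).take j ++ (fwdB 1 l).getD j 0
          :: (List.zipWith max (fwdB 1 l) (bwdB l)).drop (j + 1) := by
      rw [htake]; simp
    have hlen_take : ((fwdB 1 l).take j).length = j := by
      rw [List.length_take]; omega
    have hsetA : ∀ z : Int,
        ((fwdB 1 l).take j ++ (fwdB 1 l).getD j 0
          :: (List.zipWith max (fwdB 1 l) (bwdB l)).drop (j + 1)).set j z
        = (fwdB 1 l).take j ++ z
          :: (List.zipWith max (fwdB 1 l) (bwdB l)).drop (j + 1) := by
      intro z
      rw [List.set_append_right _ _ (by omega), hlen_take]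
      simp
    have hgetA : PySem.List.pyGetD ((fwdB 1 l).take j ++ (fwdB 1 l).getD j 0
          :: (List.zipWith max (fwdB 1 l) (bwdB l)).drop (j + 1)) (j : Int) 0
        = (fwdB 1 l).getD j 0 := by
      rw [PySem.List.pyGetD_natCast, List.getD_eq_getElem?_getD]
      rw [List.getElem?_append_right (by omega), hlen_take]
      simp
    have hgoalZ : (fwdB 1 l).take j ++ max ((fwdB 1 l).getD j 0)
          ((bwdB l).getD j 0)
          :: (List.zipWith max (fwdB 1 l) (bwdB l)).drop (j + 1)
        = (fwdB 1 l).take j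
          ++ (List.zipWith max (fwdB 1 l) (bwdB l)).drop j := by
      rw [hdropZ]
    have hFsucc : (fwdB 1 l).getD (j + 1) 0
        = stepF ((fwdB 1 l).getD j 0) (l[j]'hjm) := fwdB_getD_succ 1 _ 0 j hjm
    have hGstep : (bwdB l).getD j 0
        = stepG ((bwdB l).getD (j + 1) 0) (l[j]'hjm) := bwdB_getD _ 0 j hjm
    rw [hrange, List.foldl_cons, hAj1]
    have hstep : solveStep2 s
        ((fwdB 1 l).take j ++ (fwdB 1 l).getD j 0
            :: (List.zipWith max (fwdB 1 l) (bwdB l)).drop (j + 1),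
         if (fwdB 1 l).getD (j + 1) 0 < (bwdB l).getD (j + 1) 0
           then (bwdB l).getD (j + 1) 0 else 0) (j : Int)
        = ((fwdB 1 l).take j
            ++ (List.zipWith max (fwdB 1 l) (bwdB l)).drop j,
           if (fwdB 1 l).getD j 0 < (bwdB l).getD j 0
             then (bwdB l).getD j 0 else 0) := by
      simp only [solveStep2, hsome]
      by_cases hL : l[j]'hjm = 'L'
      · have hF1 : (fwdB 1 l).getD (j + 1) 0 = 1 := by
          rw [hFsucc, hL]; simp [stepF]
        have hGs : (bwdB l).getD j 0 = (bwdB l).getD (j + 1) 0 + 1 := by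
          rw [hGstep, hL]; simp [stepG]
        have hp2 : (if (if (fwdB 1 l).getD (j + 1) 0 < (bwdB l).getD (j + 1) 0
              then (bwdB l).getD (j + 1) 0 else 0) = 0 then 1
            else (if (fwdB 1 l).getD (j + 1) 0 < (bwdB l).getD (j + 1) 0
              then (bwdB l).getD (j + 1) 0 else 0)) + 1
            = (bwdB l).getD j 0 := by
          rw [hF1, hGs]; split_ifs <;> omega
        simp only [hL, if_true, hgetA, hp2]
        by_cases hcmp : (bwdB l).getD j 0 > (fwdB 1 l).getD j 0
        · rw [if_pos hcmp]
          simp only [Int.toNat_natCast, hsetA]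
          rw [show max ((fwdB 1 l).getD j 0) ((bwdB l).getD j 0)
              = (bwdB l).getD j 0 from max_eq_right (by omega)] at hgoalZ
          rw [hgoalZ, if_pos (show (fwdB 1 l).getD j 0 < (bwdB l).getD j 0 by omega)]
        · rw [if_neg hcmp]
          rw [show max ((fwdB 1 l).getD j 0) ((bwdB l).getD j 0)
              = (fwdB 1 l).getD j 0 from max_eq_left (by omega)] at hgoalZ
          rw [hgoalZ, if_neg (show ¬((fwdB 1 l).getD j 0 < (bwdB l).getD j 0) by omega)]
      · by_cases hEq : l[j]'hjm = '='
        · have hF1 : (fwdB 1 l).getD (j + 1) 0 = (fwdB 1 l).getD j 0 := by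
            rw [hFsucc, hEq]; simp [stepF]
          have hGs : (bwdB l).getD j 0 = (bwdB l).getD (j + 1) 0 := by
            rw [hGstep, hEq]; simp [stepG]
          simp only [hEq, show ('=' = 'L') = False from by decide, if_false, if_true, hF1, ← hGs]
          by_cases hlt : (fwdB 1 l).getD j 0 < (bwdB l).getD j 0
          · rw [if_pos hlt, if_pos (show (bwdB l).getD j 0 ≠ 0 by omega)]
            simp only [Int.toNat_natCast, hsetA]
            rw [show max ((fwdB 1 l).getD j 0) ((bwdB l).getD j 0)
                = (bwdB l).getD j 0 from max_eq_right (by omega)] at hgoalZ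
            rw [hgoalZ]
          · rw [if_neg hlt]
            rw [show max ((fwdB 1 l).getD j 0) ((bwdB l).getD j 0)
                = (fwdB 1 l).getD j 0 from max_eq_left (by omega)] at hgoalZ
            rw [if_neg (show ¬((0 : Int) ≠ 0) by simp), hgoalZ]
        · have hGs : (bwdB l).getD j 0 = 1 := by
            rw [hGstep]; simp [stepG, hL, hEq]
          simp only [if_neg hL, if_neg hEq]
          rw [hGs]
          rw [hGs] at hgoalZ
          rw [show max ((fwdB 1 l).getD j 0) (1 : Int)
              = (fwdB 1 l).getD j 0 from max_eq_left (by omega)] at hgoalZ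
          rw [hgoalZ, if_neg (show ¬((fwdB 1 l).getD j 0 < 1) by omega)]
    rw [hstep]
    exact ih (by omega)

-- ===== VERDICT (by name: the statement is the Claim_ definition above) =====
theorem solve_spec : Claim_equal_solve := by
  intro n s _hdom hpre
  unfold Spec_solve
  rw [solve_alt_eq]
  unfold Pre_solve at hpre
  rcases hpre with ⟨hn1, hnoR⟩ | ⟨hn2, hlen, htail⟩
  · -- n ≤ 1: A returns [1] * n untouched
    have hA : solve n s = List.replicate n.toNat 1 := by
      unfold solve
      show (List.foldl (solveStep2 s)
          ((List.foldl solveStep1 (List.replicate n.toNat 1, 0)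
            (PySem.List.enumerate s.toList)).1, 0)
          (PySem.List.pyRange (n - 2) (-1) (-1))).1 = _
      rw [noR s.toList hnoR 0 (List.replicate n.toNat 1),
        PySem.List.pyRange_neg_one_eq_nil (by omega)]
      rfl
    rw [hA]
    by_cases h1 : 1 ≤ n
    · have hn : n = 1 := by omega
      subst hn
      rw [show (if (1 : Int) ≤ 1 then s.toList.take ((1 : Int) - 1).toNat else ([] : List Char))
          = [] from by simp]
      decide
    · rw [show max n 0 = 0 from max_eq_right (by omega),
        PySem.List.pyRange_one_eq_nil (le_refl 0), List.map_nil,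
        show n.toNat = 0 from by omega, List.replicate_zero]
  · -- n ≥ 2: phase 1 (head) + no-op tail, then phase 2 over the head
    have htail' : ∀ c ∈ s.toList.drop (n - 1).toNat, c ≠ 'R' ∧ c ≠ '=' := by
      intro c hc
      have := List.all_eq_true.mp htail c hc
      simpa using this
    have hmlen : (n - 1).toNat ≤ s.toList.length := by omega
    have hhdlen : (s.toList.take (n - 1).toNat).length = (n - 1).toNat := by
      rw [List.length_take]; omega
    simp only [if_pos (show (1 : Int) ≤ n by omega)]
    rw [show max n 0 = ((n.toNat : Nat) : Int) from by omega]
    rw [mapRange_eq_zipWith _ _ n.toNat (by rw [fwdB_length, hhdlen]; omega)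
      (by rw [bwdB_length, hhdlen]; omega)]
    unfold solve
    show (List.foldl (solveStep2 s)
        ((List.foldl solveStep1 (List.replicate n.toNat 1, 0)
          (PySem.List.enumerate s.toList)).1, 0)
        (PySem.List.pyRange (n - 2) (-1) (-1))).1 = _
    have hA1 : (List.foldl solveStep1 (List.replicate n.toNat 1, 0)
        (PySem.List.enumerate s.toList 0)).1 = fwdB 1 (s.toList.take (n - 1).toNat) := by
      conv_lhs => rw [show s.toList = s.toList.take (n - 1).toNat ++ s.toList.drop (n - 1).toNat
        from (List.take_append_drop _ _).symm]
      rw [PySem.List.enumerate_append, List.foldl_append]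
      obtain ⟨q, hq⟩ := phase1 (s.toList.take (n - 1).toNat) [] 1 (by norm_num)
      simp only [List.nil_append, List.length_nil, Nat.cast_zero] at hq
      rw [show pZ 1 = 0 from by simp [pZ]] at hq
      have hrep : List.replicate n.toNat (1 : Int)
          = 1 :: List.replicate (s.toList.take (n - 1).toNat).length 1 := by
        rw [hhdlen, show n.toNat = (n - 1).toNat + 1 from by omega, List.replicate_succ]
      rw [hrep]
      rw [hq]
      obtain ⟨q2, hq2⟩ := tailNoop (s.toList.drop (n - 1).toNat) htail'
        (0 + ((s.toList.take (n - 1).toNat).length : Int))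
        (fwdB 1 (s.toList.take (n - 1).toNat), q)
      rw [hq2]
    rw [hA1]
    have hget : ∀ (j : Nat) (h : j < (s.toList.take (n - 1).toNat).length),
        PySem.Str.pyGet? s (j : Int) = some ((s.toList.take (n - 1).toNat)[j]'h) := by
      intro j h
      have hj2 : j < s.toList.length := by rw [hhdlen] at h; omega
      rw [PySem.Str.pyGet?_natCast, List.getElem?_eq_getElem hj2]
      rw [List.getElem_take]
    have hfl : (fwdB 1 (s.toList.take (n - 1).toNat)).length
        = (s.toList.take (n - 1).toNat).length + 1 := fwdB_length _ _
    have hgl : (bwdB (s.toList.take (n - 1).toNat)).length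
        = (s.toList.take (n - 1).toNat).length + 1 := bwdB_length _
    have hZl : (List.zipWith max (fwdB 1 (s.toList.take (n - 1).toNat))
          (bwdB (s.toList.take (n - 1).toNat))).length
        = (s.toList.take (n - 1).toNat).length + 1 := by
      rw [List.length_zipWith, hfl, hgl]; omega
    have hFm : 1 ≤ (fwdB 1 (s.toList.take (n - 1).toNat)).getD
        (s.toList.take (n - 1).toNat).length 0 :=
      fwdB_getD_pos 1 _ (by norm_num) _ (by omega)
    have hg1 : (bwdB (s.toList.take (n - 1).toNat)).getD
        (s.toList.take (n - 1).toNat).length 0 = 1 := bwdB_getD_last _ 0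
    have h0 : (if (fwdB 1 (s.toList.take (n - 1).toNat)).getD
          (s.toList.take (n - 1).toNat).length 0
          < (bwdB (s.toList.take (n - 1).toNat)).getD (s.toList.take (n - 1).toNat).length 0
        then (bwdB (s.toList.take (n - 1).toNat)).getD (s.toList.take (n - 1).toNat).length 0
        else 0) = 0 := by
      rw [hg1, if_neg (by omega)]
    have hfm : (fwdB 1 (s.toList.take (n - 1).toNat)).take (s.toList.take (n - 1).toNat).length
          ++ (List.zipWith max (fwdB 1 (s.toList.take (n - 1).toNat))
            (bwdB (s.toList.take (n - 1).toNat))).drop (s.toList.take (n - 1).toNat).length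
        = fwdB 1 (s.toList.take (n - 1).toNat) := by
      have hdrop : (List.zipWith max (fwdB 1 (s.toList.take (n - 1).toNat))
            (bwdB (s.toList.take (n - 1).toNat))).drop (s.toList.take (n - 1).toNat).length
          = [max ((fwdB 1 (s.toList.take (n - 1).toNat)).getD
                (s.toList.take (n - 1).toNat).length 0)
              ((bwdB (s.toList.take (n - 1).toNat)).getD
                (s.toList.take (n - 1).toNat).length 0)] := by
        rw [List.drop_eq_getElem_cons (by omega), List.getElem_zipWith,
          List.drop_eq_nil_of_le (by omega)]
        rw [List.getD_eq_getElem (fwdB 1 (s.toList.take (n - 1).toNat)) _ (by omega)]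
        rw [List.getD_eq_getElem (bwdB (s.toList.take (n - 1).toNat)) _ (by omega)]
      rw [hdrop, hg1, max_eq_left (by omega), List.getD_eq_getElem _ _ (by omega),
        ← List.take_succ_eq_append_getElem (by omega), ← hfl, List.take_length]
    have hmain := phase2 s (s.toList.take (n - 1).toNat) hget
      (s.toList.take (n - 1).toNat).length le_rfl
    rw [h0, hfm] at hmain
    rw [show n - 2 = (((s.toList.take (n - 1).toNat).length : Nat) : Int) - 1 from by
      rw [hhdlen]; omega]
    exact hmain
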